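-- pv_equiv track=rewrite | github.com/Pyk3i/IP---AED-I | parcial2.py | pos_umbral
-- ===== SOURCE A (Python) =====
-- def pos_umbral(s: list[int], u: int) -> int:
--     sumatoria : int = 0
--     for i in range(len(s)):
--         if s[i] > 0:
--             sumatoria = sumatoria + s[i]
--             if sumatoria > u:
--                 return i
--     return -1
-- ===== SOURCE B (Python) =====
-- def pos_umbral(s: list[int], u: int) -> int:
--     # Pass 1: prefix-sum table of positive contributions only.
--     prefix = []
--     t = 0
--     for x in s:
--         t += x if x > 0 else 0
--         prefix.append(t)
--     # Pass 2: first positive position whose cumulative positive sum exceeds u.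
--     for i, (x, c) in enumerate(zip(s, prefix)):
--         if x > 0 and c > u:
--             return i
--     return -1
-- ===== Notes on version B (the rewrite author's own statement) =====
-- stated objective: alternative
-- what changed: A's single fused early-exit loop that accumulates and tests in one pass is split into two passes: first build the full prefix-sum table of positive contributions, then scan it for the first positive position whose cumulative sum exceeds u.
import Mathlib
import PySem

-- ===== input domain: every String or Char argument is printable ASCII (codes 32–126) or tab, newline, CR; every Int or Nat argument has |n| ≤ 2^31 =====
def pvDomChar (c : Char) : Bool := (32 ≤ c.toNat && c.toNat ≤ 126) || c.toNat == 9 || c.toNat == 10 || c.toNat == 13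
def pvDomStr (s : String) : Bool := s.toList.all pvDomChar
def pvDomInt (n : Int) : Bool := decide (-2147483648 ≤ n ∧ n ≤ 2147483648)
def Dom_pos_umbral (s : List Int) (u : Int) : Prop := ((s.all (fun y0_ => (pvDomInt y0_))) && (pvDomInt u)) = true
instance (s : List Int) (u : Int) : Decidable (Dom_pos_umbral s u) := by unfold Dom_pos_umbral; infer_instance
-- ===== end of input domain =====

-- B replaces A's fused accumulate-and-test loop by two passes (build positive prefix-sum table, then scan); same values, same cost.

-- ===== PORT A =====
-- index loop with early return, accumulator `sumatoria`
def pos_umbral_go (s : List Int) (u : Int) (sumatoria : Int) (i : Nat) : Int :=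
  if h : i < s.length then
    if s[i] > 0 then
      if sumatoria + s[i] > u then (i : Int)
      else pos_umbral_go s u (sumatoria + s[i]) (i + 1)
    else pos_umbral_go s u sumatoria (i + 1)
  else -1
termination_by s.length - i

def pos_umbral (s : List Int) (u : Int) : Int := pos_umbral_go s u 0 0

-- ===== PORT B =====
-- pass 1: prefix-sum table of positive contributions (B's append loop with running total t)
def pos_umbral_prefix (s : List Int) (t : Int) : List Int :=
  match s with
  | [] => []
  | x :: rest =>
    let t' := t + (if x > 0 then x else 0)
    t' :: pos_umbral_prefix rest t'

-- pass 2: enumerate(zip(s, prefix)), first i with x > 0 and c > u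
def pos_umbral_scan (s pre : List Int) (u : Int) (i : Nat) : Int :=
  match s, pre with
  | x :: s', c :: p' =>
    if x > 0 ∧ c > u then (i : Int) else pos_umbral_scan s' p' u (i + 1)
  | _, _ => -1

def pos_umbral_alt (s : List Int) (u : Int) : Int :=
  pos_umbral_scan s (pos_umbral_prefix s 0) u 0

-- ===== PRECONDITION & SPEC =====
def Spec_pos_umbral (s : List Int) (u : Int) (out : Int) : Prop := out = pos_umbral_alt s u
instance (s : List Int) (u : Int) (out : Int) : Decidable (Spec_pos_umbral s u out) := by unfold Spec_pos_umbral; infer_instance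

-- ===== CLAIM (what is proved, stated in full; the proofs are below) =====
def Claim_equal_pos_umbral : Prop := ∀ (s : List Int) (u : Int), Dom_pos_umbral s u → Spec_pos_umbral s u (pos_umbral s u)

-- ===== LEMMAS AND PROOFS =====
theorem pos_umbral_aux (s : List Int) (u : Int) (i : Nat) (t : Int) :
    pos_umbral_go s u t i = pos_umbral_scan (s.drop i) (pos_umbral_prefix (s.drop i) t) u i := by
  by_cases h : i < s.length
  · have hd : s.drop i = s[i] :: s.drop (i + 1) := List.drop_eq_getElem_cons h
    rw [pos_umbral_go, dif_pos h, hd, pos_umbral_prefix]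
    simp only [pos_umbral_scan]
    by_cases hp : s[i] > 0
    · by_cases hu : t + s[i] > u
      · simp [hp, hu]
      · have ih := pos_umbral_aux s u (i + 1) (t + s[i])
        simp [hp, hu, ih]
    · have ih := pos_umbral_aux s u (i + 1) t
      simp [hp, ih]
  · rw [pos_umbral_go, dif_neg h]
    have hnil : s.drop i = [] := List.drop_eq_nil_of_le (Nat.le_of_not_lt h)
    rw [hnil]
    rfl
termination_by s.length - i
decreasing_by all_goals omega

-- ===== VERDICT (by name: the statement is the Claim_ definition above) =====
theorem pos_umbral_spec : Claim_equal_pos_umbral := by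
  intro s u _
  unfold Spec_pos_umbral pos_umbral pos_umbral_alt
  simpa using pos_umbral_aux s u 0 0
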